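-- pv_equiv track=rewrite | github.com/bgs2509/free-ai-selector | scripts/run_container_tests.py | infer_file_from_classname
-- ===== SOURCE A (Python) =====
-- def infer_file_from_classname(classname: str, modules: dict[str, str]) -> str:
--     if not classname:
--         return ""
--     parts = classname.split(".")
--     for index in range(len(parts), 0, -1):
--         candidate = ".".join(parts[:index])
--         file_path = modules.get(candidate)
--         if file_path:
--             return file_path
--     return ""
-- ===== SOURCE B (Python) =====
-- def infer_file_from_classname(classname: str, modules: dict[str, str]) -> str:
--     if not classname:
--         return ""
--     best_path = ""
--     best_len = -1
--     for key, path in modules.items():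
--         if path and (classname == key or classname.startswith(key + ".")) and len(key) > best_len:
--             best_path, best_len = path, len(key)
--     return best_path
-- ===== Notes on version B (the rewrite author's own statement) =====
-- stated objective: alternative
-- what changed: Instead of generating dotted prefixes of classname and probing the dict for each, B makes one pass over modules.items(), testing each truthy-valued key for being a component-boundary prefix of classname and keeping the longest such key's value.
import Mathlib
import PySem

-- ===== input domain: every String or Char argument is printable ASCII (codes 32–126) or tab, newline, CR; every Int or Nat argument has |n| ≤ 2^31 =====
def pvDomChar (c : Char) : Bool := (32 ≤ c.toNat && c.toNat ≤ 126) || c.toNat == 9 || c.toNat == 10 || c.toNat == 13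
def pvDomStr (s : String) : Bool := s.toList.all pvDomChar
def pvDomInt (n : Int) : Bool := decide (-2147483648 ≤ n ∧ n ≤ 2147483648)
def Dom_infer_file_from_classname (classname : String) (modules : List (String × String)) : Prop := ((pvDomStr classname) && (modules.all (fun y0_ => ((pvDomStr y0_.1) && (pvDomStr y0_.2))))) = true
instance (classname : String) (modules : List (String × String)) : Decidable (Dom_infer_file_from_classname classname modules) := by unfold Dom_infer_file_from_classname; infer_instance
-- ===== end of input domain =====

-- B replaces A's probe-each-prefix loop over generated candidates by a single pass over the
-- dict items, keeping the truthy-valued key that is a component-boundary prefix of classname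
-- with the greatest length (objective: alternative decomposition, same cost).

-- ===== PORT A =====
-- '.'.join(parts[:index])
def inferACand (parts : List String) (i : Int) : String :=
  PySem.Str.join "." (PySem.List.slice parts none (some i))

-- the 'for index in range(len(parts), 0, -1)' loop with its early return
def inferALoop (modules : List (String × String)) (parts : List String) : List Int → String
  | [] => ""
  | i :: rest =>
    match PySem.Dict.get? (PySem.Dict.mk modules) (inferACand parts i) with
    | some file_path => if file_path ≠ "" then file_path else inferALoop modules parts rest
    | none => inferALoop modules parts rest

def infer_file_from_classname (classname : String) (modules : List (String × String)) : String :=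
  if classname = "" then ""
  else
    -- classname.split("."): the separator is the nonempty literal ".", so split? is exact here
    let parts := (PySem.Str.split? classname ".").getD []
    inferALoop modules parts (PySem.List.pyRange ((parts.length : Int)) 0 (-1))

-- ===== PORT B =====
-- loop body: keep (path, len(key)) when path is truthy, key is a component-boundary
-- prefix of classname and len(key) beats the best seen so far
def inferBStep (classname : String) (st : String × Int) (kv : String × String) : String × Int :=
  if kv.2 ≠ "" ∧ (classname = kv.1 ∨ PySem.Str.startswith classname (kv.1 ++ ".") = true) ∧
      st.2 < PySem.Str.len kv.1 then
    (kv.2, PySem.Str.len kv.1)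
  else st

def infer_file_from_classname_alt (classname : String) (modules : List (String × String)) : String :=
  if classname = "" then ""
  else (modules.foldl (inferBStep classname) ("", -1)).1

-- ===== PRECONDITION & SPEC =====
-- Pre_: the association list stands for a Python dict, whose keys are necessarily distinct;
-- on lists with duplicate keys (unreachable from Python) the two ports may disagree.
def Pre_infer_file_from_classname (classname : String) (modules : List (String × String)) : Prop :=
  (modules.map Prod.fst).Nodup

instance (classname : String) (modules : List (String × String)) : Decidable (Pre_infer_file_from_classname classname modules) := by unfold Pre_infer_file_from_classname; infer_instance

def pvWitness_infer_file_from_classname : String × (List (String × String)) :=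
  ("pkg.mod.Class", [("pkg.mod", "pkg/mod.py"), ("pkg", "pkg/init.py")])

def Spec_infer_file_from_classname (classname : String) (modules : List (String × String)) (out : String) : Prop := out = infer_file_from_classname_alt classname modules
instance (classname : String) (modules : List (String × String)) (out : String) : Decidable (Spec_infer_file_from_classname classname modules out) := by unfold Spec_infer_file_from_classname; infer_instance

-- ===== CLAIM (what is proved, stated in full; the proofs are below) =====
def Claim_equal_infer_file_from_classname : Prop := ∀ (classname : String) (modules : List (String × String)), Dom_infer_file_from_classname classname modules → Pre_infer_file_from_classname classname modules → Spec_infer_file_from_classname classname modules (infer_file_from_classname classname modules)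

-- ===== LEMMAS AND PROOFS =====

def pvCandC (P : List (List Char)) (j : Nat) : List Char := List.intercalate ['.'] (P.take j)

theorem pvGo_eq (fuel : Nat) (l cur : List Char) (acc : List (List Char)) (h : l.length ≤ fuel) :
    PySem.Chars.splitOn.go ['.'] fuel l cur acc
      = acc.reverse ++ List.modifyHead (cur.reverse ++ ·) (l.splitOn '.') := by
  induction fuel generalizing l cur acc with
  | zero =>
    have : l = [] := by cases l <;> simp_all
    subst this
    rw [PySem.Chars.splitOn.go.eq_def]
    simp [List.splitOn]
  | succ fuel ih =>
    cases l with
    | nil =>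
      rw [PySem.Chars.splitOn.go.eq_def]
      simp [List.splitOn]
    | cons c rest =>
      rw [PySem.Chars.splitOn.go.eq_def]
      simp only []
      by_cases hc : c = '.'
      · subst hc
        have hp : (['.'] : List Char).isPrefixOf ('.' :: rest) = true := by
          simp [List.isPrefixOf]
        simp only [hp, if_true, List.length_cons, List.length_nil, List.drop_succ_cons, List.drop_zero]
        rw [ih rest [] _ (by simpa using Nat.le_of_succ_le_succ h)]
        simp only [List.splitOn, List.splitOnP_cons, beq_self_eq_true, if_true]
        cases hx : List.splitOnP (fun x => x == '.') rest <;> simp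
      · have hp : (['.'] : List Char).isPrefixOf (c :: rest) = false := by
          simp [List.isPrefixOf, Ne.symm hc]
        simp only [hp, Bool.false_eq_true, if_false]
        rw [ih rest (c :: cur) acc (by simpa using Nat.le_of_succ_le_succ h)]
        simp only [List.splitOn, List.splitOnP_cons, beq_iff_eq, if_neg hc]
        obtain ⟨hh, t, hht⟩ : ∃ hh t, List.splitOnP (· == '.') rest = hh :: t := by
          rcases hx : List.splitOnP (· == '.') rest with _ | ⟨hh, t⟩
          · exact absurd hx (List.splitOnP_ne_nil _ _)
          · exact ⟨hh, t, rfl⟩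
        rw [hht]
        simp

theorem pvSplitOn_eq (s : List Char) :
    PySem.Chars.splitOn s ['.'] = s.splitOn '.' := by
  unfold PySem.Chars.splitOn
  rw [pvGo_eq _ _ _ _ (by omega)]
  rcases hx : s.splitOn '.' with _ | ⟨hh, t⟩
  · exact absurd hx (List.splitOnP_ne_nil _ _)
  · simp

theorem pvSplitOn_dotfree (s : List Char) : ∀ p ∈ s.splitOn '.', ('.' : Char) ∉ p := by
  induction s with
  | nil => simp [List.splitOn]
  | cons c rest ih =>
    simp only [List.splitOn, List.splitOnP_cons, beq_iff_eq] at *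
    by_cases hc : c = '.'
    · simp only [if_pos hc]
      intro p hp
      rcases List.mem_cons.mp hp with h | h
      · subst h; simp
      · exact ih p h
    · simp only [if_neg hc]
      rcases hx : List.splitOnP (fun x => x == '.') rest with _ | ⟨hh, t⟩
      · exact absurd hx (List.splitOnP_ne_nil _ _)
      · rw [hx] at ih
        simp only [List.modifyHead_cons]
        intro p hp
        rcases List.mem_cons.mp hp with h | h
        · subst h
          intro hm
          rcases List.mem_cons.mp hm with hm | hm
          · exact hc hm.symm
          · exact ih hh (by simp) hm
        · exact ih p (List.mem_cons_of_mem _ h)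

theorem pvIntercalate_cons₂ (p : List Char) (rest : List (List Char)) (h : rest ≠ []) :
    List.intercalate ['.'] (p :: rest) = p ++ '.' :: List.intercalate ['.'] rest := by
  rcases rest with _ | ⟨q, rest'⟩
  · exact absurd rfl h
  · simp [List.intercalate]

theorem pvIntercalate_append₂ (l₁ l₂ : List (List Char)) (h₁ : l₁ ≠ []) (h₂ : l₂ ≠ []) :
    List.intercalate ['.'] (l₁ ++ l₂)
      = List.intercalate ['.'] l₁ ++ '.' :: List.intercalate ['.'] l₂ := by
  induction l₁ with
  | nil => exact absurd rfl h₁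
  | cons p rest ih =>
    rcases rest with _ | ⟨q, rest'⟩
    · rw [List.singleton_append, pvIntercalate_cons₂ p l₂ h₂]
      simp [List.intercalate]
    · rw [List.cons_append, pvIntercalate_cons₂ p ((q :: rest') ++ l₂) (by simp),
        pvIntercalate_cons₂ p (q :: rest') (by simp), ih (by simp)]
      simp

theorem pvCandC_succ (P : List (List Char)) (j : Nat) (h1 : 1 ≤ j) (hj : j < P.length) :
    pvCandC P (j+1) = pvCandC P j ++ '.' :: P[j] := by
  unfold pvCandC
  rw [List.take_add_one, List.getElem?_eq_getElem hj]
  rw [pvIntercalate_append₂ _ _ (by rw [Ne, List.take_eq_nil_iff]; push Not; exact ⟨by omega, by rintro rfl; simp at hj⟩) (by simp)]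
  simp [List.intercalate]

theorem pvCandC_len_lt (P : List (List Char)) (j j' : Nat) (h1 : 1 ≤ j) (hj : j < j')
    (hj' : j' ≤ P.length) : (pvCandC P j).length < (pvCandC P j').length := by
  induction j' with
  | zero => omega
  | succ m ih =>
    rcases Nat.lt_or_ge j m with hlt | hge
    · have := ih hlt (by omega)
      rw [pvCandC_succ P m (by omega) (by omega)]
      simp; omega
    · have hjm : j = m := by omega
      subst hjm
      rw [pvCandC_succ P j h1 (by omega)]
      simp

theorem pvCandC_boundary (P : List (List Char)) (hne : P ≠ []) (j : Nat) (h1 : 1 ≤ j)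
    (hj : j ≤ P.length) :
    pvCandC P j = List.intercalate ['.'] P ∨ pvCandC P j ++ ['.'] <+: List.intercalate ['.'] P := by
  rcases Nat.lt_or_ge j P.length with hlt | hge
  · right
    have htake : P.take j ≠ [] := by
      rw [Ne, List.take_eq_nil_iff]; push Not; exact ⟨by omega, hne⟩
    have hdrop : P.drop j ≠ [] := by
      rw [Ne, List.drop_eq_nil_iff]; omega
    unfold pvCandC
    conv_rhs => rw [← List.take_append_drop j P]
    rw [pvIntercalate_append₂ _ _ htake hdrop]
    exact ⟨List.intercalate ['.'] (P.drop j), by simp⟩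
  · left
    have : j = P.length := by omega
    subst this
    simp [pvCandC]

theorem pvBoundary_fwd (P : List (List Char)) (hne : P ≠ [])
    (hfree : ∀ p ∈ P, ('.' : Char) ∉ p) (k : List Char)
    (h : k = List.intercalate ['.'] P ∨ k ++ ['.'] <+: List.intercalate ['.'] P) :
    ∃ j : Nat, 1 ≤ j ∧ j ≤ P.length ∧ k = pvCandC P j := by
  induction P generalizing k with
  | nil => exact absurd rfl hne
  | cons p rest ih =>
    rcases h with h | h
    · exact ⟨(p :: rest).length, by simp, le_refl _, by simp [pvCandC, h]⟩
    · rcases List.eq_nil_or_concat rest with hrest | _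
      · -- rest = []: I = p
        subst hrest
        have hI : List.intercalate ['.'] [p] = p := by simp [List.intercalate]
        rw [hI] at h
        have hdot : ('.' : Char) ∈ p := h.subset (by simp : ('.' : Char) ∈ k ++ ['.'])
        exact absurd hdot (hfree p (by simp))
      · have hrest : rest ≠ [] := by rintro rfl; simp_all
        have hI : List.intercalate ['.'] (p :: rest)
            = (p ++ ['.']) ++ List.intercalate ['.'] rest := by
          rw [pvIntercalate_cons₂ p rest hrest]; simp
        rw [hI] at h
        have hp1 : (p ++ ['.']) <+: (p ++ ['.']) ++ List.intercalate ['.'] rest :=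
          List.prefix_append _ _
        rcases List.prefix_or_prefix_of_prefix h hp1 with hc | hc
        · -- k ++ ['.'] <+: p ++ ['.']
          rcases Nat.lt_or_ge k.length p.length with hlen | hlen
          · -- k ++ ['.'] <+: p, contradiction with dot-free
            have hkp : k ++ ['.'] <+: p := by
              have := List.prefix_of_prefix_length_le hc (List.prefix_append p ['.'])
                (by simp; omega)
              exact this
            have hdot : ('.' : Char) ∈ p := hkp.subset (by simp : ('.' : Char) ∈ k ++ ['.'])
            exact absurd hdot (hfree p (by simp))
          · have hlen' : k.length = p.length := by
              have := hc.length_le; simp at this; omega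
            have heq : k ++ ['.'] = p ++ ['.'] := hc.eq_of_length (by simp [hlen'])
            have hkp : k = p := by
              have := List.append_inj_left' heq (by simp); exact this
            refine ⟨1, le_refl _, by simp, ?_⟩
            simp [pvCandC, hkp, List.intercalate]
        · -- p ++ ['.'] <+: k ++ ['.']
          rcases Nat.lt_or_ge p.length k.length with hlen | hlen
          · have hpk : p ++ ['.'] <+: k := by
              refine List.prefix_of_prefix_length_le hc (List.prefix_append k ['.']) ?_
              simp; omega
            obtain ⟨k', rfl⟩ := hpk
            have hk' : k' ++ ['.'] <+: List.intercalate ['.'] rest := by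
              have h' := h
              rw [List.append_assoc (p ++ ['.'])] at h'
              exact (List.prefix_append_right_inj _).mp h'
            obtain ⟨j', hj1, hj2, hj3⟩ := ih hrest
              (fun q hq => hfree q (List.mem_cons_of_mem _ hq)) k' (Or.inr hk')
            refine ⟨j' + 1, by omega, by simp; omega, ?_⟩
            unfold pvCandC at *
            rw [List.take_succ_cons, pvIntercalate_cons₂ p _ (by
              rw [Ne, List.take_eq_nil_iff]; push Not; exact ⟨by omega, hrest⟩)]
            rw [← hj3]; simp
          · have hlen' : k.length = p.length := by
              have := hc.length_le; simp at this; omega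
            have heq : p ++ ['.'] = k ++ ['.'] := hc.eq_of_length (by simp [hlen'])
            have hkp : k = p := by
              have := List.append_inj_left' heq (by simp); exact this.symm
            refine ⟨1, le_refl _, by simp, ?_⟩
            simp [pvCandC, hkp, List.intercalate]

theorem pvALoop_none (modules : List (String × String)) (parts : List String) (L : List Int)
    (h : ∀ i ∈ L, ∀ v, PySem.Dict.get? (PySem.Dict.mk modules) (inferACand parts i) = some v → v = "") :
    inferALoop modules parts L = "" := by
  induction L with
  | nil => rfl
  | cons i rest ih =>
    unfold inferALoop
    rcases hx : PySem.Dict.get? (PySem.Dict.mk modules) (inferACand parts i) with _ | v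
    · exact ih (fun j hj => h j (List.mem_cons_of_mem _ hj))
    · have hv : v = "" := h i (by simp) v hx
      simp [hv]
      exact ih (fun j hj => h j (List.mem_cons_of_mem _ hj))

theorem pvALoop_hit (modules : List (String × String)) (parts : List String)
    (jm : Nat) (vm : String) (a : Nat) (h1 : 1 ≤ jm) (h2 : jm ≤ a)
    (hget : PySem.Dict.get? (PySem.Dict.mk modules) (inferACand parts (jm : Int)) = some vm)
    (hvm : vm ≠ "")
    (habove : ∀ j : Nat, jm < j → j ≤ a → ∀ v,
        PySem.Dict.get? (PySem.Dict.mk modules) (inferACand parts (j : Int)) = some v → v = "") :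
    inferALoop modules parts (PySem.List.pyRange (a : Int) 0 (-1)) = vm := by
  induction a with
  | zero => omega
  | succ m ih =>
    rw [PySem.List.pyRange_neg_one_cons (by omega : (0:Int) < ((m+1 : Nat) : Int))]
    unfold inferALoop
    rcases Nat.lt_or_ge jm (m+1) with hlt | hge
    · -- head is above jm: not truthy
      have hm : ((m+1 : Nat) : Int) - 1 = ((m : Nat) : Int) := by push_cast; ring
      rcases hx : PySem.Dict.get? (PySem.Dict.mk modules) (inferACand parts ((m+1 : Nat) : Int)) with _ | v
      · rw [hm]
        exact ih (by omega) (fun j hj1 hj2 => habove j hj1 (by omega))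
      · have hv : v = "" := habove (m+1) hlt (le_refl _) v hx
        simp [hv]
        exact ih (by omega) (fun j hj1 hj2 => habove j hj1 (by omega))
    · have hjm : jm = m + 1 := by omega
      subst hjm
      rw [hget]
      simp [hvm]

theorem pvBFold_lt (classname : String) (pre : List (String × String)) (st : String × Int)
    (L : Int) (hst : st.2 < L)
    (h : ∀ kv ∈ pre, kv.2 ≠ "" ∧ (classname = kv.1 ∨ PySem.Str.startswith classname (kv.1 ++ ".") = true) →
        PySem.Str.len kv.1 < L) :
    (pre.foldl (inferBStep classname) st).2 < L := by
  induction pre generalizing st with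
  | nil => simpa
  | cons kv rest ih =>
    simp only [List.foldl_cons]
    apply ih
    · unfold inferBStep
      split_ifs with hc
      · exact h kv (by simp) ⟨hc.1, hc.2.1⟩
      · exact hst
    · exact fun kv' hkv' => h kv' (List.mem_cons_of_mem _ hkv')

theorem pvBFold_keep (classname : String) (suf : List (String × String)) (st : String × Int)
    (h : ∀ kv ∈ suf, kv.2 ≠ "" ∧ (classname = kv.1 ∨ PySem.Str.startswith classname (kv.1 ++ ".") = true) →
        PySem.Str.len kv.1 ≤ st.2) :
    suf.foldl (inferBStep classname) st = st := by
  induction suf with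
  | nil => rfl
  | cons kv rest ih =>
    simp only [List.foldl_cons]
    have hstep : inferBStep classname st kv = st := by
      unfold inferBStep
      split_ifs with hc
      · exact absurd (h kv (by simp) ⟨hc.1, hc.2.1⟩) (by omega)
      · rfl
    rw [hstep]
    exact ih (fun kv' hkv' => h kv' (List.mem_cons_of_mem _ hkv'))

theorem pvCand_toList (parts : List String) (P : List (List Char))
    (hmapP : parts.map String.toList = P) (j : Nat) :
    (inferACand parts (j : Int)).toList = pvCandC P j := by
  unfold inferACand pvCandC
  rw [PySem.List.slice_to_natCast, PySem.Str.toList_join]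
  show PySem.Chars.join ['.'] _ = _
  unfold PySem.Chars.join
  rw [List.map_take, hmapP]

theorem pvBoundary_bridge (classname key : String) (P : List (List Char))
    (hI : List.intercalate ['.'] P = classname.toList) :
    (classname = key ∨ PySem.Str.startswith classname (key ++ ".") = true)
      ↔ (key.toList = List.intercalate ['.'] P ∨ key.toList ++ ['.'] <+: List.intercalate ['.'] P) := by
  rw [hI, PySem.Str.startswith_eq, PySem.Chars.startswith_iff, String.toList_append]
  constructor
  · rintro (h | h)
    · left; rw [h]
    · right; exact h
  · rintro (h | h)
    · left; exact String.toList_inj.mp h.symm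
    · right; exact h

theorem pvGood_char (classname : String) (modules : List (String × String))
    (parts : List String) (P : List (List Char))
    (hmapP : parts.map String.toList = P) (hPne : P ≠ [])
    (hfree : ∀ p ∈ P, ('.' : Char) ∉ p)
    (hI : List.intercalate ['.'] P = classname.toList)
    (hnodup : (modules.map Prod.fst).Nodup)
    (kv : String × String) (hkv : kv ∈ modules)
    (hgood : kv.2 ≠ "" ∧ (classname = kv.1 ∨ PySem.Str.startswith classname (kv.1 ++ ".") = true)) :
    ∃ j : Nat, 1 ≤ j ∧ j ≤ P.length ∧ kv.1 = inferACand parts (j : Int) ∧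
      PySem.Dict.get? (PySem.Dict.mk modules) (inferACand parts (j : Int)) = some kv.2 := by
  obtain ⟨j, hj1, hj2, hj3⟩ := pvBoundary_fwd P hPne hfree kv.1.toList
    ((pvBoundary_bridge classname kv.1 P hI).mp hgood.2)
  have hkey : kv.1 = inferACand parts (j : Int) :=
    String.toList_inj.mp (by rw [hj3, pvCand_toList parts P hmapP j])
  refine ⟨j, hj1, hj2, hkey, ?_⟩
  rw [← hkey]
  apply PySem.Dict.get?_of_mem_items
  · exact hkv
  · rw [PySem.Dict.keys_mk]; exact hnodup

def pvQb (modules : List (String × String)) (q : List String) (j : Nat) : Bool :=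
  ((PySem.Dict.get? (PySem.Dict.mk modules) (inferACand q (j : Int))).getD "" != "")

set_option maxHeartbeats 2000000 in
theorem pvMain_core (classname : String) (modules : List (String × String)) (q : List String)
    (hnodup : (modules.map Prod.fst).Nodup) (hcn : classname ≠ "")
    (hmapP : q.map String.toList = classname.toList.splitOn '.') :
    inferALoop modules q (PySem.List.pyRange ((q.length : Int)) 0 (-1))
      = (modules.foldl (inferBStep classname) ("", -1)).1 := by
  have hcs : classname.toList ≠ [] := by simpa [String.toList_eq_nil_iff] using hcn
  have hPne : classname.toList.splitOn '.' ≠ [] := List.splitOnP_ne_nil _ _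
  have hfree : ∀ p ∈ classname.toList.splitOn '.', ('.' : Char) ∉ p := pvSplitOn_dotfree _
  have hI : List.intercalate ['.'] (classname.toList.splitOn '.') = classname.toList :=
    List.intercalate_splitOn _ '.'
  have hlen : q.length = (classname.toList.splitOn '.').length := by rw [← hmapP]; simp
  by_cases hex : ∃ j : Nat, 1 ≤ j ∧ j ≤ q.length ∧ pvQb modules q j = true
  · -- some candidate hits: both sides return the value at the greatest hitting index
    obtain ⟨j₀, hj01, hj02, hQ0⟩ := hex
    have hQm : pvQb modules q (Nat.findGreatest (fun j => pvQb modules q j = true) q.length) = true :=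
      Nat.findGreatest_spec (P := fun j => pvQb modules q j = true) hj02 hQ0
    set jm : Nat := Nat.findGreatest (fun j => pvQb modules q j = true) q.length with hjmdef
    have hjm1 : 1 ≤ jm := le_trans hj01 (Nat.le_findGreatest hj02 hQ0)
    have hjm2 : jm ≤ q.length := Nat.findGreatest_le _
    have habove : ∀ j : Nat, jm < j → j ≤ q.length → ¬ (pvQb modules q j = true) :=
      fun j hja hjb => Nat.findGreatest_is_greatest hja hjb
    obtain ⟨vm, hget⟩ : ∃ vm, PySem.Dict.get? (PySem.Dict.mk modules)
        (inferACand q (jm : Int)) = some vm := by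
      rcases hx : PySem.Dict.get? (PySem.Dict.mk modules) (inferACand q (jm : Int)) with _ | v
      · unfold pvQb at hQm; rw [hx] at hQm; simp at hQm
      · exact ⟨v, rfl⟩
    have hvm : vm ≠ "" := by
      unfold pvQb at hQm; rw [hget] at hQm; simpa using hQm
    -- A returns vm
    rw [pvALoop_hit modules q jm vm q.length hjm1 hjm2 hget hvm ?habove]
    case habove =>
      intro j hja hjb v hv
      by_contra hvne
      exact habove j hja hjb (by unfold pvQb; rw [hv]; simpa using hvne)
    -- B also returns vm
    have hmem : (inferACand q (jm : Int), vm) ∈ modules :=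
      PySem.Dict.mem_items_of_get?_eq_some _ hget
    obtain ⟨pre, suf, hms⟩ := List.append_of_mem hmem
    have hL0 : (0:Int) ≤ PySem.Str.len (inferACand q (jm : Int)) := by
      rw [PySem.Str.len_eq]; positivity
    have hothers : ∀ kv ∈ modules, kv.1 ≠ inferACand q (jm : Int) →
        (kv.2 ≠ "" ∧ (classname = kv.1 ∨ PySem.Str.startswith classname (kv.1 ++ ".") = true)) →
        PySem.Str.len kv.1 < PySem.Str.len (inferACand q (jm : Int)) := by
      intro kv hkv hne hgood
      obtain ⟨j, hj1, hj2, hkey, hgetj⟩ :=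
        pvGood_char classname modules q _ hmapP hPne hfree hI hnodup kv hkv hgood
      have hQj : pvQb modules q j = true := by
        unfold pvQb; rw [hgetj]; simpa using hgood.1
      have hjlt : j < jm := by
        rcases Nat.lt_or_ge j jm with h | h
        · exact h
        · rcases Nat.eq_or_lt_of_le h with h' | h'
          · exact absurd (by rw [hkey, ← h']) hne
          · exact absurd hQj (habove j h' (by omega))
      have hll := pvCandC_len_lt (classname.toList.splitOn '.') j jm hj1 hjlt (by omega)
      rw [PySem.Str.len_eq, PySem.Str.len_eq, hkey,
        pvCand_toList q _ hmapP j, pvCand_toList q _ hmapP jm]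
      exact_mod_cast hll
    -- keys distinct in the decomposition
    have hnodup' := hnodup
    rw [hms] at hnodup'
    simp only [List.map_append, List.map_cons] at hnodup'
    have hpre_ne : ∀ kv ∈ pre, kv.1 ≠ inferACand q (jm : Int) := by
      intro kv hkv
      rcases List.nodup_append.mp hnodup' with ⟨_, _, hdisj⟩
      intro hcontra
      have hm1 : kv.1 ∈ List.map Prod.fst pre := List.mem_map_of_mem hkv
      have hm2 : kv.1 ∈ inferACand q (jm : Int) :: List.map Prod.fst suf := by
        rw [hcontra]; exact List.mem_cons_self ..
      exact hdisj kv.1 hm1 kv.1 hm2 rfl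
    have hsuf_ne : ∀ kv ∈ suf, kv.1 ≠ inferACand q (jm : Int) := by
      intro kv hkv
      rcases List.nodup_append.mp hnodup' with ⟨_, hcs', _⟩
      rcases List.nodup_cons.mp hcs' with ⟨hnm, _⟩
      intro hcontra
      exact hnm (by rw [← hcontra]; exact List.mem_map_of_mem hkv)
    -- the fold visits pre, the winning pair, then suf
    rw [hms, List.foldl_append, List.foldl_cons]
    have hst1 : (pre.foldl (inferBStep classname) ("", -1)).2
        < PySem.Str.len (inferACand q (jm : Int)) := by
      apply pvBFold_lt classname pre _ _ (by omega)
      intro kv hkv hgood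
      exact hothers kv (by rw [hms]; exact List.mem_append_left _ hkv) (hpre_ne kv hkv) hgood
    have hstep : inferBStep classname (pre.foldl (inferBStep classname) ("", -1))
        (inferACand q (jm : Int), vm) = (vm, PySem.Str.len (inferACand q (jm : Int))) := by
      unfold inferBStep
      rw [if_pos]
      refine ⟨hvm, ?_, hst1⟩
      apply (pvBoundary_bridge classname _ _ hI).mpr
      rw [pvCand_toList q _ hmapP jm]
      exact pvCandC_boundary _ hPne jm hjm1 (by omega)
    rw [hstep]
    rw [pvBFold_keep classname suf _ ?_]
    intro kv hkv hgood
    have := hothers kv (by rw [hms]; exact List.mem_append_right _ (List.mem_cons_of_mem _ hkv))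
      (hsuf_ne kv hkv) hgood
    omega
  · -- no candidate hits: both sides return ""
    push Not at hex
    have hA : inferALoop modules q (PySem.List.pyRange ((q.length : Int)) 0 (-1)) = "" := by
      apply pvALoop_none modules q
      intro i hi v hv
      rw [PySem.List.mem_pyRange_neg_one] at hi
      by_contra hvne
      have hjnat : i = ((i.toNat : Nat) : Int) := by omega
      have hQi : pvQb modules q i.toNat = true := by
        unfold pvQb; rw [hjnat] at hv; rw [hv]; simpa using hvne
      exact absurd hQi (hex i.toNat (by omega) (by omega))
    rw [hA, pvBFold_keep classname modules ("", -1) ?_]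
    intro kv hkv hgood
    obtain ⟨j, hj1, hj2, hkey, hgetj⟩ :=
      pvGood_char classname modules q _ hmapP hPne hfree hI hnodup kv hkv hgood
    have hQj : pvQb modules q j = true := by
      unfold pvQb; rw [hgetj]; simpa using hgood.1
    exact absurd hQj (hex j hj1 (by omega))

theorem pvMain (classname : String) (modules : List (String × String))
    (hnodup : (modules.map Prod.fst).Nodup) :
    infer_file_from_classname classname modules = infer_file_from_classname_alt classname modules := by
  unfold infer_file_from_classname infer_file_from_classname_alt
  by_cases hcn : classname = ""
  · simp [hcn]
  · simp only [if_neg hcn]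
    have hchars : PySem.Chars.split? classname.toList ".".toList
        = some (classname.toList.splitOn '.') := by
      show PySem.Chars.split? classname.toList ['.'] = some _
      unfold PySem.Chars.split?
      rw [if_neg (by simp), pvSplitOn_eq]
    have hsplit := PySem.Str.split?_map classname "."
    rw [hchars] at hsplit
    rcases hq : PySem.Str.split? classname "." with _ | q
    · rw [hq] at hsplit; simp at hsplit
    · rw [hq] at hsplit
      simp only [Option.map_some, Option.some.injEq] at hsplit
      show inferALoop modules ((some q).getD []) _ = _
      simp only [Option.getD_some]
      exact pvMain_core classname modules q hnodup hcn hsplit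

-- ===== VERDICT (by name: the statement is the Claim_ definition above) =====
theorem infer_file_from_classname_spec : Claim_equal_infer_file_from_classname := by
  intro classname modules _ hpre
  unfold Spec_infer_file_from_classname
  exact pvMain classname modules hpre
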